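-- pv_equiv track=rewrite | github.com/justant/WaggleBot | ai_worker/tts/number_reader.py | sino_number
-- ===== SOURCE A (Python) =====
-- _SINO_DIGITS: dict[str, str] = {
--     "0": "영", "1": "일", "2": "이", "3": "삼", "4": "사",
--     "5": "오", "6": "육", "7": "칠", "8": "팔", "9": "구",
-- }
--
-- _SINO_UNITS = ["", "십", "백", "천"]
--
-- _SINO_LARGE = ["", "만", "억", "조"]
--
-- def sino_number(n: int) -> str:
--     """정수를 한자어 수사로 변환 (4자리씩 만/억/조 처리)."""
--     if n == 0:
--         return "영"
--     if n < 0: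
--         return "마이너스 " + sino_number(-n)
--
--     str_n = str(n)
--     groups: list[str] = []
--     while str_n:
--         groups.append(str_n[-4:])
--         str_n = str_n[:-4]
--
--     parts: list[str] = []
--     for i, group in enumerate(groups):
--         group_result = ""
--         for j, digit in enumerate(reversed(group)):
--             d = int(digit)
--             if d == 0:
--                 continue
--             unit = _SINO_UNITS[j]
--             # 십/백/천 앞 "일"은 생략 (예: 100 → 백, 1000 → 천)
--             if d == 1 and j > 0:
--                 group_result = unit + group_result
--             else:
--                 group_result = _SINO_DIGITS[str(d)] + unit + group_result
--         if group_result: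
--             parts.append(group_result + _SINO_LARGE[i])
--
--     return "".join(reversed(parts))
-- ===== SOURCE B (Python) =====
-- _SINO_DIGITS: dict[str, str] = {
--     "0": "영", "1": "일", "2": "이", "3": "삼", "4": "사",
--     "5": "오", "6": "육", "7": "칠", "8": "팔", "9": "구",
-- }
--
-- _SINO_UNITS = ["", "십", "백", "천"]
--
-- _SINO_LARGE = ["", "만", "억", "조"]
--
-- def sino_number(n: int) -> str:
--     """정수를 한자어 수사로 변환 — 자릿수 한 번 훑기(단일 패스)."""
--     if n == 0:
--         return "영"
--     if n < 0:
--         return "마이너스 " + sino_number(-n)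
--     s = str(n)
--     L = len(s)
--     out = []
--     has = False
--     for i, ch in enumerate(s):
--         p = L - 1 - i            # position from the right
--         small = p % 4
--         if ch != "0":
--             has = True
--             if ch == "1" and small > 0:
--                 out.append(_SINO_UNITS[small])
--             else:
--                 out.append(_SINO_DIGITS[ch] + _SINO_UNITS[small])
--         if small == 0:
--             if has:
--                 out.append(_SINO_LARGE[p // 4])
--             has = False
--     return "".join(out)
-- ===== Notes on version B (the rewrite author's own statement) =====
-- stated objective: alternative
-- what changed: Replaces A's chunk-into-4-digit-groups-then-nested-reversed-scan (slicing the string in a while loop, building each group string by prepending, collecting parts and joining them reversed) with a single left-to-right pass over the digit string that derives the small unit (p % 4) and large unit (p // 4) from each digit's position and uses a has-nonzero-in-group flag to decide whether to emit the large unit at group boundaries.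
import Mathlib
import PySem

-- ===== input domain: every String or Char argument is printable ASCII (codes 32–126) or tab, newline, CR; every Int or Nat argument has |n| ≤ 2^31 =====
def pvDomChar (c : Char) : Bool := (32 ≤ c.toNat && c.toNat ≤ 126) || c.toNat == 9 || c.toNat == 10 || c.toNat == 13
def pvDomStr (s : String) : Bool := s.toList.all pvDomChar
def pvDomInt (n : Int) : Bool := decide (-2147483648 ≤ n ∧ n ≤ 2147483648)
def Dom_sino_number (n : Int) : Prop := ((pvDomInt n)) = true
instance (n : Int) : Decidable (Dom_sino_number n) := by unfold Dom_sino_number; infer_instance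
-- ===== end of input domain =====

-- B replaces A's chunk-into-4-digit-groups nested scan by a single left-to-right positional
-- pass over the digit string (alternative decomposition, same asymptotic cost).

-- ===== PORT A =====
-- module constants (shared by both Pythons; ported once, at List Char level)
def pvSinoDigits : PySem.Dict (List Char) (List Char) :=
  PySem.Dict.ofList
    [(['0'], ['영']), (['1'], ['일']), (['2'], ['이']), (['3'], ['삼']), (['4'], ['사']),
     (['5'], ['오']), (['6'], ['육']), (['7'], ['칠']), (['8'], ['팔']), (['9'], ['구'])]
def pvSinoUnits : List (List Char) := [[], ['십'], ['백'], ['천']]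
def pvSinoLarge : List (List Char) := [[], ['만'], ['억'], ['조']]

-- the `while str_n:` loop of A: groups.append(str_n[-4:]); str_n = str_n[:-4]
def pvGroupsA (s : List Char) : List (List Char) :=
  if h : s = [] then []
  else
    PySem.List.slice s (some (-4)) none :: pvGroupsA (PySem.List.slice s none (some (-4)))
termination_by s.length
decreasing_by
  rw [PySem.List.slice_to_neg_ofNat s 4 (by omega)]
  simp only [List.length_take]
  have : s.length ≠ 0 := fun hc => h (List.eq_nil_of_length_eq_zero hc)
  omega

-- A's inner loop: `for j, digit in enumerate(reversed(group))`, prepending to group_result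
def pvGroupResA (g : List Char) : List Char :=
  (PySem.List.enumerate g.reverse 0).foldl (fun acc jd =>
    let d : Int := (PySem.Int.ofChars? [jd.2]).getD 0       -- int(digit); always a digit here
    if d = 0 then acc
    else
      let unit := PySem.List.pyGetD pvSinoUnits jd.1 []
      if d = 1 ∧ 0 < jd.1 then unit ++ acc
      else PySem.Dict.getD pvSinoDigits (PySem.Int.toChars d) [] ++ unit ++ acc) []

-- A's outer loop: `for i, group in enumerate(groups)`, appending nonempty parts
def pvPartsA (gs : List (List Char)) : List (List Char) :=
  (PySem.List.enumerate gs 0).foldl (fun parts ig =>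
    let gr := pvGroupResA ig.2
    if gr ≠ [] then parts ++ [gr ++ PySem.List.pyGetD pvSinoLarge ig.1 []] else parts) []

-- A's positive-number body: str(n), group, read groups, "".join(reversed(parts))
def pvSinoPos (n : Int) : List Char :=
  ((pvPartsA (pvGroupsA (PySem.Int.toChars n))).reverse).flatten

-- `sino_number(-n)` in A recurses exactly once with -n > 0, landing in the positive body;
-- that one step is unfolded into the helper call to satisfy Lean's termination checker.
def sino_number (n : Int) : String :=
  if n = 0 then "영"
  else if n < 0 then String.ofList ('마' :: '이' :: '너' :: '스' :: ' ' :: pvSinoPos (-n))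
  else String.ofList (pvSinoPos n)

-- ===== PORT B =====
-- one step of B's single pass: (i, ch) with p = L - 1 - i, small = p % 4, large = p // 4
def pvBStep (L : Int) (st : List (List Char) × Bool) (ic : Int × Char) :
    List (List Char) × Bool :=
  let p := L - 1 - ic.1
  let small := PySem.Int.mod p 4
  let st1 :=
    if ic.2 ≠ '0' then
      if ic.2 = '1' ∧ 0 < small then
        (st.1 ++ [PySem.List.pyGetD pvSinoUnits small []], true)
      else
        (st.1 ++ [PySem.Dict.getD pvSinoDigits [ic.2] [] ++ PySem.List.pyGetD pvSinoUnits small []],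
         true)
    else st
  if small = 0 then
    ((if st1.2 then st1.1 ++ [PySem.List.pyGetD pvSinoLarge (PySem.Int.floordiv p 4) []] else st1.1),
     false)
  else st1

-- B's positive-number body: s = str(n); fold `for i, ch in enumerate(s)`; "".join(out)
def pvSinoPosAlt (n : Int) : List Char :=
  let s := PySem.Int.toChars n
  (((PySem.List.enumerate s 0).foldl (pvBStep (s.length : Int)) ([], false)).1).flatten

def sino_number_alt (n : Int) : String :=
  if n = 0 then "영"
  else if n < 0 then String.ofList ('마' :: '이' :: '너' :: '스' :: ' ' :: pvSinoPosAlt (-n))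
  else String.ofList (pvSinoPosAlt n)

-- ===== PRECONDITION & SPEC =====
def Spec_sino_number (n : Int) (out : String) : Prop := out = sino_number_alt n
instance (n : Int) (out : String) : Decidable (Spec_sino_number n out) := by
  unfold Spec_sino_number; infer_instance

-- ===== CLAIM (what is proved, stated in full; the proofs are below) =====
def Claim_equal_sino_number : Prop := ∀ (n : Int), Dom_sino_number n → Spec_sino_number n (sino_number n)

-- ===== LEMMAS AND PROOFS =====

-- reference reading of one group: piece of a digit char at in-group position j (from the right)
def pvPiece (c : Char) (j : Nat) : List Char :=
  if c = '0' then []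
  else if c = '1' ∧ 0 < j then pvSinoUnits.getD j []
  else PySem.Dict.getD pvSinoDigits [c] [] ++ pvSinoUnits.getD j []

def pvRead : List Char → List Char
  | [] => []
  | c :: rest => pvPiece c rest.length ++ pvRead rest

-- reference reading of the group list (low group first, large-unit index i)
def pvReadGs : List (List Char) → Nat → List Char
  | [], _ => []
  | g :: gs, i =>
      pvReadGs gs (i + 1) ++ (if pvRead g = [] then [] else pvRead g ++ pvSinoLarge.getD i [])

def pvDigitChars : List Char := ['0', '1', '2', '3', '4', '5', '6', '7', '8', '9']

theorem pv_mem_digitChars {c : Char} (h : c.isDigit) : c ∈ pvDigitChars := by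
  have h1 : 48 ≤ c.toNat ∧ c.toNat ≤ 57 := by
    simp only [Char.isDigit, decide_eq_true_eq, Bool.and_eq_true, ge_iff_le,
      UInt32.le_iff_toNat_le] at h
    exact ⟨h.1, h.2⟩
  have hc : c = Char.ofNat c.toNat := by simp [Char.ofNat_toNat]
  rw [hc]
  obtain ⟨hl, hr⟩ := h1
  generalize hg : c.toNat = m at hl hr
  interval_cases m <;> decide

-- facts about the parse of one digit char, by the ten cases
theorem pv_digit_facts {c : Char} (h : c ∈ pvDigitChars) :
    ((PySem.Int.ofChars? [c]).getD 0 = 0 ↔ c = '0') ∧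
    ((PySem.Int.ofChars? [c]).getD 0 = 1 ↔ c = '1') ∧
    PySem.Dict.getD pvSinoDigits (PySem.Int.toChars ((PySem.Int.ofChars? [c]).getD 0)) [] =
      PySem.Dict.getD pvSinoDigits [c] [] := by
  fin_cases h <;> refine ⟨⟨?_, ?_⟩, ⟨?_, ?_⟩, ?_⟩ <;> decide

theorem pv_enumerate_append_singleton {α : Type} (xs : List α) (c : α) (s : Int) :
    PySem.List.enumerate (xs ++ [c]) s =
      PySem.List.enumerate xs s ++ [(s + xs.length, c)] := by
  induction xs generalizing s with
  | nil => simp [PySem.List.enumerate_cons, PySem.List.enumerate_nil]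
  | cons x xs ih =>
      simp [PySem.List.enumerate_cons, ih, List.length_cons]
      ring_nf

-- the fold body of pvGroupResA, named so the lemmas can speak about it (definitionally equal)
def pvAF : List Char → Int × Char → List Char := fun acc jd =>
    let d : Int := (PySem.Int.ofChars? [jd.2]).getD 0
    if d = 0 then acc
    else
      let unit := PySem.List.pyGetD pvSinoUnits jd.1 []
      if d = 1 ∧ 0 < jd.1 then unit ++ acc
      else PySem.Dict.getD pvSinoDigits (PySem.Int.toChars d) [] ++ unit ++ acc

theorem pv_AF_step {c : Char} (hc : c ∈ pvDigitChars) (j : Nat) (acc : List Char) :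
    pvAF acc ((j : Int), c) = pvPiece c j ++ acc := by
  obtain ⟨h0, h1, hD⟩ := pv_digit_facts hc
  simp only [pvAF, pvPiece, PySem.List.pyGetD_natCast]
  by_cases hz : c = '0'
  · subst hz
    simp [show (PySem.Int.ofChars? ['0']).getD 0 = 0 from by decide]
  · have hnz : ¬ ((PySem.Int.ofChars? [c]).getD 0 = 0) := fun hx => hz (h0.mp hx)
    rw [if_neg hnz, if_neg hz]
    by_cases ho : c = '1' ∧ 0 < j
    · rw [if_pos ⟨h1.mpr ho.1, by exact_mod_cast ho.2⟩, if_pos ho]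
    · have : ¬ ((PySem.Int.ofChars? [c]).getD 0 = 1 ∧ 0 < (j : Int)) := by
        intro hx; exact ho ⟨h1.mp hx.1, by exact_mod_cast hx.2⟩
      rw [if_neg this, if_neg ho, hD]

theorem pv_groupResA_aux (g : List Char) (hd : ∀ c ∈ g, c ∈ pvDigitChars) (acc : List Char) :
    (PySem.List.enumerate g.reverse 0).foldl pvAF acc = pvRead g ++ acc := by
  induction g generalizing acc with
  | nil => simp [PySem.List.enumerate_nil, pvRead]
  | cons c rest ih =>
      have hrev : (c :: rest).reverse = rest.reverse ++ [c] := by simp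
      rw [hrev, pv_enumerate_append_singleton, List.foldl_append]
      rw [ih (fun x hx => hd x (List.mem_cons_of_mem _ hx))]
      simp only [List.foldl_cons, List.foldl_nil, List.length_reverse, zero_add]
      rw [pv_AF_step (hd c (List.mem_cons_self .. )) rest.length]
      simp [pvRead]

theorem pv_groupResA_eq (g : List Char) (hd : ∀ c ∈ g, c ∈ pvDigitChars) :
    pvGroupResA g = pvRead g := by
  have : pvGroupResA g = (PySem.List.enumerate g.reverse 0).foldl pvAF [] := rfl
  rw [this, pv_groupResA_aux g hd]; simp

-- the fold body of pvPartsA, named (definitionally equal)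
def pvPF : List (List Char) → Int × List Char → List (List Char) := fun parts ig =>
    let gr := pvGroupResA ig.2
    if gr ≠ [] then parts ++ [gr ++ PySem.List.pyGetD pvSinoLarge ig.1 []] else parts

theorem pv_partsA_aux (gs : List (List Char)) (hd : ∀ g ∈ gs, ∀ c ∈ g, c ∈ pvDigitChars) :
    ∀ (i : Nat) (acc : List (List Char)),
      (((PySem.List.enumerate gs (i : Int)).foldl pvPF acc).reverse).flatten =
        pvReadGs gs i ++ (acc.reverse).flatten := by
  induction gs with
  | nil => intro i acc; simp [PySem.List.enumerate_nil, pvReadGs]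
  | cons g gs ih =>
      intro i acc
      rw [PySem.List.enumerate_cons, List.foldl_cons]
      have hc : ((i : Int) + 1) = ((i + 1 : Nat) : Int) := by push_cast; ring
      rw [hc, ih (fun g' hg' => hd g' (List.mem_cons_of_mem _ hg'))]
      have hg := pv_groupResA_eq g (hd g (List.mem_cons_self ..))
      show pvReadGs gs (i + 1) ++ ((pvPF acc ((i : Int), g)).reverse).flatten = _
      simp only [pvPF, hg, PySem.List.pyGetD_natCast, pvReadGs]
      by_cases hnil : pvRead g = []
      · simp [hnil]
      · simp [hnil]
  -- (the last steps rebalance the appends)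

theorem pv_sinoPos_eq (s : List Char) (hd : ∀ c ∈ s, c ∈ pvDigitChars)
    (hgs : ∀ g ∈ pvGroupsA s, ∀ c ∈ g, c ∈ s) :
    ((pvPartsA (pvGroupsA s)).reverse).flatten = pvReadGs (pvGroupsA s) 0 := by
  have h := pv_partsA_aux (pvGroupsA s)
    (fun g hg c hc => hd c (hgs g hg c hc)) 0 []
  simpa using h

-- chars of the groups come from the string
theorem pv_groups_chars (s : List Char) : ∀ g ∈ pvGroupsA s, ∀ c ∈ g, c ∈ s := by
  induction s using pvGroupsA.induct with
  | case1 => rw [pvGroupsA]; simp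
  | case2 s h ih =>
      rw [pvGroupsA, dif_neg h]
      intro g hg c hc
      rcases List.mem_cons.mp hg with hg | hg
      · exact PySem.List.mem_of_mem_slice s _ _ (hg ▸ hc)
      · exact PySem.List.mem_of_mem_slice s _ _ (ih g hg c hc)

-- unfolding pvGroupsA once, in drop/take form
theorem pv_groupsA_cons (s : List Char) (h : s ≠ []) :
    pvGroupsA s = s.drop (s.length - 4) :: pvGroupsA (s.take (s.length - 4)) := by
  rw [pvGroupsA]
  rw [dif_neg h, PySem.List.slice_from_neg_ofNat s 4 (by omega),
    PySem.List.slice_to_neg_ofNat s 4 (by omega)]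

-- ===== B-side reference machinery =====

-- B's step with the position given as a Nat
def pvStepN (st : List (List Char) × Bool) (c : Char) (p : Nat) : List (List Char) × Bool :=
  let small := p % 4
  let st1 :=
    if c ≠ '0' then
      if c = '1' ∧ 0 < small then (st.1 ++ [pvSinoUnits.getD small []], true)
      else (st.1 ++ [PySem.Dict.getD pvSinoDigits [c] [] ++ pvSinoUnits.getD small []], true)
    else st
  if small = 0 then
    ((if st1.2 then st1.1 ++ [pvSinoLarge.getD (p / 4) []] else st1.1), false)
  else st1

-- B's pass in structural form: the char before `rest` sits at position base + rest.length
def pvBloop (base : Nat) : (List (List Char) × Bool) → List Char → List (List Char) × Bool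
  | st, [] => st
  | st, c :: rest => pvBloop base (pvStepN st c (base + rest.length)) rest

theorem pv_bstep_eq (L k : Nat) (hk : k < L) (st : List (List Char) × Bool) (c : Char) :
    pvBStep (L : Int) st ((k : Int), c) = pvStepN st c (L - 1 - k) := by
  simp only [pvBStep, pvStepN]
  have hp : (L : Int) - 1 - (k : Int) = ((L - 1 - k : Nat) : Int) := by omega
  rw [hp]
  rw [PySem.Int.mod_eq_emod_of_pos (by omega), PySem.Int.floordiv_eq_ediv_of_pos (by omega)]
  have hm : ((L - 1 - k : Nat) : Int) % 4 = ((((L - 1 - k) % 4 : Nat)) : Int) := by push_cast; ring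
  have hdv : ((L - 1 - k : Nat) : Int) / 4 = ((((L - 1 - k) / 4 : Nat)) : Int) := by push_cast; ring
  rw [hm, hdv]
  simp only [PySem.List.pyGetD_natCast, Int.natCast_pos, Nat.cast_eq_zero]

theorem pv_bridge (L : Nat) (s : List Char) :
    ∀ (k : Nat) (st : List (List Char) × Bool), k + s.length ≤ L →
      (PySem.List.enumerate s (k : Int)).foldl (pvBStep (L : Int)) st =
        pvBloop (L - k - s.length) st s := by
  induction s with
  | nil => intro k st _; simp [PySem.List.enumerate_nil, pvBloop]
  | cons c rest ih =>
      intro k st hk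
      rw [PySem.List.enumerate_cons, List.foldl_cons]
      have hc : ((k : Int) + 1) = ((k + 1 : Nat) : Int) := by push_cast; ring
      rw [hc, ih (k + 1) _ (by simp at hk ⊢; omega)]
      have h1 : L - (k + 1) - rest.length = L - k - (c :: rest).length := by
        simp; omega
      have h2 : (L - k - (c :: rest).length) + rest.length = L - 1 - k := by
        simp at hk ⊢; omega
      rw [h1, pvBloop]
      rw [pv_bstep_eq L k (by simp at hk; omega) st c, h2]

-- pieces of one group, as the list of appended fragments
def pvPieces : List Char → List (List Char)
  | [] => []
  | c :: rest => (if c = '0' then [] else [pvPiece c rest.length]) ++ pvPieces rest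

theorem pv_flatten_pieces (g : List Char) : (pvPieces g).flatten = pvRead g := by
  induction g with
  | nil => simp [pvPieces, pvRead]
  | cons c rest ih =>
      by_cases hz : c = '0' <;> simp [pvPieces, pvRead, hz, ih, pvPiece]

theorem pv_piece_ne_nil {c : Char} (hc : c ∈ pvDigitChars) (h0 : c ≠ '0') {j : Nat}
    (hj : j ≤ 3) : pvPiece c j ≠ [] := by
  interval_cases j <;> fin_cases hc <;> simp_all <;> decide

theorem pv_read_nil_iff (g : List Char) (hd : ∀ c ∈ g, c ∈ pvDigitChars) (hlen : g.length ≤ 4) :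
    (pvRead g = [] ↔ g.any (fun c => c != '0') = false) := by
  induction g with
  | nil => simp [pvRead]
  | cons c rest ih =>
      simp only [pvRead, List.any_cons, List.append_eq_nil_iff, Bool.or_eq_false_iff,
        bne_eq_false_iff_eq]
      constructor
      · rintro ⟨h1, h2⟩
        by_cases hz : c = '0'
        · exact ⟨hz, ((ih (fun x hx => hd x (List.mem_cons_of_mem _ hx))
            (by simp at hlen ⊢; omega)).mp h2)⟩
        · exact absurd h1 (pv_piece_ne_nil (hd c (List.mem_cons_self ..)) hz
            (by simp at hlen; omega))
      · rintro ⟨h1, h2⟩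
        refine ⟨by simp [pvPiece, h1], ?_⟩
        exact (ih (fun x hx => hd x (List.mem_cons_of_mem _ hx))
          (by simp at hlen ⊢; omega)).mpr h2

-- one step strictly inside a chunk (in-group position r ≥ 1: no group boundary)
theorem pv_stepN_mid (out : List (List Char)) (b : Bool) (c : Char) (K r : Nat)
    (h1 : 1 ≤ r) (h3 : r ≤ 3) :
    pvStepN (out, b) c (4 * K + r) =
      (out ++ (if c = '0' then [] else [pvPiece c r]), b || (c != '0')) := by
  have hm : (4 * K + r) % 4 = r := by omega
  simp only [pvStepN, hm]
  by_cases hz : c = '0'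
  · subst hz; simp [show r ≠ 0 from by omega]
  · by_cases ho : c = '1' ∧ 0 < r <;>
      simp [pvPiece, hz, ho, show r ≠ 0 from by omega]

-- the last step of a chunk (in-group position 0: group boundary at 4*K)
theorem pv_stepN_last (out : List (List Char)) (b : Bool) (c : Char) (K : Nat) :
    pvStepN (out, b) c (4 * K) =
      ((out ++ (if c = '0' then [] else [pvPiece c 0])) ++
        (if b || (c != '0') then [pvSinoLarge.getD K []] else []), false) := by
  have hm : (4 * K) % 4 = 0 := by omega
  have hd : (4 * K) / 4 = K := by omega
  simp only [pvStepN, hm, hd]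
  by_cases hz : c = '0'
  · subst hz; cases b <;> simp
  · simp [pvPiece, hz]

-- one chunk of at most four digits, last char at position 4*K
theorem pv_chunk : ∀ (g : List Char), g ≠ [] → g.length ≤ 4 →
    (∀ c ∈ g, c ∈ pvDigitChars) → ∀ (K : Nat) (out : List (List Char)) (b : Bool),
    pvBloop (4 * K) (out, b) g =
      (out ++ pvPieces g ++
        (if b || g.any (fun c => c != '0') then [pvSinoLarge.getD K []] else []), false) := by
  intro g
  induction g with
  | nil => intro hne; exact absurd rfl hne
  | cons c rest ih =>
      intro _ hlen hd K out b
      show pvBloop (4 * K) (pvStepN (out, b) c (4 * K + rest.length)) rest = _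
      by_cases hr : rest = []
      · subst hr
        simp only [List.length_nil, Nat.add_zero, pv_stepN_last, pvBloop, pvPieces,
          List.any_cons, List.any_nil, Bool.or_false, List.append_nil]
      · have hr1 : 1 ≤ rest.length := by
          cases rest with
          | nil => exact absurd rfl hr
          | cons a t => simp
        have hr3 : rest.length ≤ 3 := by simp at hlen; omega
        rw [pv_stepN_mid out b c K rest.length hr1 hr3]
        rw [ih hr (by simp at hlen; omega)
          (fun x hx => hd x (List.mem_cons_of_mem _ hx)) K _ _]
        simp only [pvPieces, List.any_cons]
        simp [List.append_assoc, Bool.or_assoc]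

theorem pv_bloop_append (base : Nat) (u v : List Char) (st : List (List Char) × Bool) :
    pvBloop base st (u ++ v) = pvBloop base (pvBloop (base + v.length) st u) v := by
  induction u generalizing st with
  | nil => simp [pvBloop]
  | cons c rest ih =>
      show pvBloop base (pvStepN st c (base + (rest ++ v).length)) (rest ++ v) = _
      rw [ih]
      have : base + (rest ++ v).length = (base + v.length) + rest.length := by
        simp; omega
      rw [this]
      rfl

theorem pv_bmain_aux : ∀ (N : Nat) (s : List Char), s.length ≤ N → s ≠ [] →
    (∀ c ∈ s, c ∈ pvDigitChars) → ∀ (K0 : Nat) (out : List (List Char)),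
      (pvBloop (4 * K0) (out, false) s).2 = false ∧
      ((pvBloop (4 * K0) (out, false) s).1).flatten = out.flatten ++ pvReadGs (pvGroupsA s) K0 := by
  intro N
  induction N with
  | zero =>
      intro s hN hne
      cases s
      · exact absurd rfl hne
      · simp at hN
  | succ N ih =>
      intro s hN hne hd K0 out
      by_cases hle : s.length ≤ 4
      · -- a single group
        have hgs : pvGroupsA s = [s] := by
          rw [pv_groupsA_cons s hne]
          have h0 : s.length - 4 = 0 := by omega
          rw [h0]
          simp [pvGroupsA]
        rw [pv_chunk s hne hle hd K0 out false, hgs]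
        refine ⟨by trivial, ?_⟩
        simp only [pvReadGs, Bool.false_or, List.flatten_append, List.nil_append]
        by_cases hz : pvRead s = []
        · have ha : s.any (fun c => c != '0') = false := (pv_read_nil_iff s hd hle).mp hz
          simp [ha, hz, pv_flatten_pieces]
        · have ha : s.any (fun c => c != '0') = true := by
            rcases hb : s.any (fun c => c != '0') with _ | _
            · exact absurd ((pv_read_nil_iff s hd hle).mpr hb) hz
            · rfl
          simp [ha, hz, pv_flatten_pieces]
      · -- split off the low 4-digit chunk
        set front := s.take (s.length - 4) with hfront
        set back := s.drop (s.length - 4) with hback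
        have hsfb : s = front ++ back := (List.take_append_drop _ s).symm
        have hlf : front.length = s.length - 4 := by
          rw [hfront, List.length_take]; omega
        have hlb : back.length = 4 := by
          rw [hback, List.length_drop]; omega
        have hfne : front ≠ [] := by
          intro hc; rw [hc] at hlf; simp at hlf; omega
        have hbne : back ≠ [] := by
          intro hc; rw [hc] at hlb; simp at hlb
        have hdf : ∀ c ∈ front, c ∈ pvDigitChars := fun c hc =>
          hd c (hsfb ▸ List.mem_append_left _ hc)
        have hdb : ∀ c ∈ back, c ∈ pvDigitChars := fun c hc =>
          hd c (hsfb ▸ List.mem_append_right _ hc)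
        have hsplit : pvBloop (4 * K0) (out, false) s =
            pvBloop (4 * K0) (pvBloop (4 * (K0 + 1)) (out, false) front) back := by
          conv_lhs => rw [hsfb]
          rw [pv_bloop_append]
          rw [hlb]
          congr 1
        obtain ⟨h2, h1⟩ := ih front (by omega) hfne hdf (K0 + 1) out
        have hst : pvBloop (4 * (K0 + 1)) (out, false) front =
            ((pvBloop (4 * (K0 + 1)) (out, false) front).1, false) := by
          conv_lhs => rw [← Prod.mk.eta (p := pvBloop (4 * (K0 + 1)) (out, false) front)]
          rw [h2]
        rw [hst] at hsplit
        rw [hsplit, pv_chunk back hbne (by omega) hdb K0 _ false]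
        have hgs : pvGroupsA s = back :: pvGroupsA front := pv_groupsA_cons s hne
        rw [hgs]
        simp only [pvReadGs, Bool.false_or]
        refine ⟨by trivial, ?_⟩
        by_cases hz : pvRead back = []
        · have ha : back.any (fun c => c != '0') = false :=
            (pv_read_nil_iff back hdb (by omega)).mp hz
          simp [ha, hz, pv_flatten_pieces, h1, List.flatten_append]
        · have ha : back.any (fun c => c != '0') = true := by
            rcases hb : back.any (fun c => c != '0') with _ | _
            · exact absurd ((pv_read_nil_iff back hdb (by omega)).mpr hb) hz
            · rfl
          simp [ha, hz, pv_flatten_pieces, h1, List.flatten_append]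

theorem pv_bmain (s : List Char) (hne : s ≠ []) (hd : ∀ c ∈ s, c ∈ pvDigitChars) :
    ∀ (K0 : Nat) (out : List (List Char)),
      pvBloop (4 * K0) (out, false) s =
        ((pvBloop (4 * K0) (out, false) s).1, false) ∧
      ((pvBloop (4 * K0) (out, false) s).1).flatten = out.flatten ++ pvReadGs (pvGroupsA s) K0 := by
  intro K0 out
  obtain ⟨h2, h1⟩ := pv_bmain_aux s.length s le_rfl hne hd K0 out
  refine ⟨?_, h1⟩
  conv_lhs => rw [← Prod.mk.eta (p := pvBloop (4 * K0) (out, false) s)]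
  rw [h2]

theorem pv_sinoPosAlt_eq (n : Int) (hd : ∀ c ∈ PySem.Int.toChars n, c ∈ pvDigitChars)
    (hne : PySem.Int.toChars n ≠ []) :
    pvSinoPosAlt n = pvReadGs (pvGroupsA (PySem.Int.toChars n)) 0 := by
  have hb := pv_bridge (PySem.Int.toChars n).length (PySem.Int.toChars n) 0 ([], false)
    (by simp)
  have hm := (pv_bmain (PySem.Int.toChars n) hne hd 0 []).2
  show (((PySem.List.enumerate (PySem.Int.toChars n) 0).foldl
      (pvBStep ((PySem.Int.toChars n).length : Int)) ([], false)).1).flatten = _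
  rw [show ((0 : Nat) : Int) = (0 : Int) from rfl] at hb
  rw [hb]
  simpa using hm

theorem pv_toChars_digits (n : Int) (h : 0 < n) :
    (∀ c ∈ PySem.Int.toChars n, c ∈ pvDigitChars) ∧ PySem.Int.toChars n ≠ [] := by
  have hn : ¬ n < 0 := by omega
  constructor
  · intro c hc
    rw [PySem.Int.toChars, if_neg hn] at hc
    exact pv_mem_digitChars (Nat.isDigit_of_mem_toDigits (by omega) (by omega) hc)
  · rw [PySem.Int.toChars, if_neg hn]
    have := @Nat.length_toDigits_pos 10 n.toNat
    intro hc; rw [hc] at this; simp at this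

theorem pv_pos_eq (n : Int) (h : 0 < n) : pvSinoPos n = pvSinoPosAlt n := by
  obtain ⟨hd, hne⟩ := pv_toChars_digits n h
  rw [pvSinoPos, pv_sinoPos_eq _ hd (pv_groups_chars _), pv_sinoPosAlt_eq n hd hne]

-- ===== VERDICT (by name: the statement is the Claim_ definition above) =====
theorem sino_number_spec : Claim_equal_sino_number := by
  intro n _
  show sino_number n = sino_number_alt n
  rw [sino_number, sino_number_alt]
  by_cases h0 : n = 0
  · simp [h0]
  · by_cases hneg : n < 0
    · rw [if_neg h0, if_neg h0, if_pos hneg, if_pos hneg, pv_pos_eq (-n) (by omega)]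
    · rw [if_neg h0, if_neg h0, if_neg hneg, if_neg hneg,
        pv_pos_eq n (by omega)]
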